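-- pv_equiv track=rewrite | github.com/abhinavob/handwriting-to-latex | beam_search.py | bracket_penalty
-- ===== SOURCE A (Python) =====
-- def bracket_penalty(new_token, open_bracket_id, close_bracket_id, penalty=-10000): ##change as per nedeed
--     sum_open_bracket=0
--     sum_close_bracket=0
--     if open_bracket_id == -1 or close_bracket_id == -1: return 0 # Safety check
--
--     for i in new_token:
--         if(i==open_bracket_id):
--             sum_open_bracket+=1
--         elif(i==close_bracket_id):
--             sum_close_bracket+=1
--         if(sum_open_bracket-sum_close_bracket<0):
--             return penalty;
--     if(sum_open_bracket!=sum_close_bracket):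
--         return penalty;
--     else:
--         return 0
-- ===== SOURCE B (Python) =====
-- def bracket_penalty(new_token, open_bracket_id, close_bracket_id, penalty=-10000):
--     if open_bracket_id == -1 or close_bracket_id == -1:
--         return 0  # Safety check
--     deltas = [1 if t == open_bracket_id else (-1 if t == close_bracket_id else 0)
--               for t in new_token]
--     prefixes = []
--     total = 0
--     for d in deltas:
--         total += d
--         prefixes.append(total)
--     if total != 0 or any(x < 0 for x in prefixes):
--         return penalty
--     return 0
-- ===== Notes on version B (the rewrite author's own statement) =====
-- stated objective: alternative
-- what changed: Replaced the two-counter early-return scan with a build-the-delta-table / prefix-sum-table decomposition: a +1/-1/0 delta per token, a running-prefix list, then a reduction 'final total nonzero or some prefix negative'.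
import Mathlib
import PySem

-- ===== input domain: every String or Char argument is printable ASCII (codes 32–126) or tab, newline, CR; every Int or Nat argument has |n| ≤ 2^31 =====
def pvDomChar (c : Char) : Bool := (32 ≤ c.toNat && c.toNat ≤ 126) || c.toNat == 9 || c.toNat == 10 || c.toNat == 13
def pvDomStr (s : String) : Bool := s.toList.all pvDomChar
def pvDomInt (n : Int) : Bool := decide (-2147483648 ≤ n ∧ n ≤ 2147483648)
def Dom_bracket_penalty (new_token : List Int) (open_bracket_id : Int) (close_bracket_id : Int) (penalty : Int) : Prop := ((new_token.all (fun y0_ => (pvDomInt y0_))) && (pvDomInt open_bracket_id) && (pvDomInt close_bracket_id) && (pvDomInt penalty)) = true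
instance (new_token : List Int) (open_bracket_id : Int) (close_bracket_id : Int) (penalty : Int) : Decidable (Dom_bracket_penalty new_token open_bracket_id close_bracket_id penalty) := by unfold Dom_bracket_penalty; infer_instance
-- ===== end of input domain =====

-- B replaces A's two-counter early-return scan by a delta-table + prefix-sum-table decomposition (same O(n) cost, different shape).


-- ===== PORT A =====
-- A's for-loop with its two counters and the early 'return penalty'
def pvLoopA (o c p : Int) : List Int → Int → Int → Int
  | [], so, sc => if so ≠ sc then p else 0
  | i :: rest, so, sc =>
      let so' := if i = o then so + 1 else so
      let sc' := if ¬ i = o ∧ i = c then sc + 1 else sc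
      if so' - sc' < 0 then p else pvLoopA o c p rest so' sc'

def bracket_penalty (new_token : List Int) (open_bracket_id : Int) (close_bracket_id : Int) (penalty : Int) : Int :=
  if open_bracket_id = -1 ∨ close_bracket_id = -1 then 0
  else pvLoopA open_bracket_id close_bracket_id penalty new_token 0 0

-- ===== PORT B =====
-- the delta list comprehension
def pvDeltas (o c : Int) (nt : List Int) : List Int :=
  nt.map (fun t => if t = o then (1 : Int) else if t = c then -1 else 0)

-- B's prefix-building loop: returns (final total, list of running prefix sums)
def pvScan (total : Int) : List Int → Int × List Int
  | [] => (total, [])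
  | d :: rest =>
      let t := total + d
      let r := pvScan t rest
      (r.1, t :: r.2)

def bracket_penalty_alt (new_token : List Int) (open_bracket_id : Int) (close_bracket_id : Int) (penalty : Int) : Int :=
  if open_bracket_id = -1 ∨ close_bracket_id = -1 then 0
  else
    let res := pvScan 0 (pvDeltas open_bracket_id close_bracket_id new_token)
    if res.1 ≠ 0 ∨ res.2.any (fun x => decide (x < 0)) then penalty else 0

-- ===== PRECONDITION & SPEC =====
def Spec_bracket_penalty (new_token : List Int) (open_bracket_id : Int) (close_bracket_id : Int) (penalty : Int) (out : Int) : Prop := out = bracket_penalty_alt new_token open_bracket_id close_bracket_id penalty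
instance (new_token : List Int) (open_bracket_id : Int) (close_bracket_id : Int) (penalty : Int) (out : Int) : Decidable (Spec_bracket_penalty new_token open_bracket_id close_bracket_id penalty out) := by unfold Spec_bracket_penalty; infer_instance

-- ===== CLAIM (what is proved, stated in full; the proofs are below) =====
def Claim_equal_bracket_penalty : Prop := ∀ (new_token : List Int) (open_bracket_id : Int) (close_bracket_id : Int) (penalty : Int), Dom_bracket_penalty new_token open_bracket_id close_bracket_id penalty → Spec_bracket_penalty new_token open_bracket_id close_bracket_id penalty (bracket_penalty new_token open_bracket_id close_bracket_id penalty)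

-- ===== LEMMAS AND PROOFS =====
-- loop invariant: A's loop from counters (so, sc) equals B's check on the scan started at total = so - sc
theorem pvLoopA_eq_scan (o c p : Int) :
    ∀ (nt : List Int) (so sc : Int),
      pvLoopA o c p nt so sc =
        (let res := pvScan (so - sc) (pvDeltas o c nt)
         if res.1 ≠ 0 ∨ res.2.any (fun x => decide (x < 0)) then p else 0) := by
  intro nt
  induction nt with
  | nil =>
      intro so sc
      simp only [pvLoopA, pvDeltas, List.map_nil, pvScan, List.any_nil]
      by_cases h : so = sc
      · simp [h]
      · have : so - sc ≠ 0 := by omega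
        simp [h, this]
  | cons i rest ih =>
      intro so sc
      have hso : (if i = o then so + 1 else so) - (if ¬ i = o ∧ i = c then sc + 1 else sc)
          = so - sc + (if i = o then (1 : Int) else if i = c then -1 else 0) := by
        by_cases h1 : i = o <;> by_cases h2 : i = c <;> simp [h1, h2] <;> omega
      have hrec := ih (if i = o then so + 1 else so) (if ¬ i = o ∧ i = c then sc + 1 else sc)
      rw [hso] at hrec
      simp only [pvLoopA, pvDeltas, List.map_cons, pvScan, hso, hrec]
      by_cases hneg : (so - sc + (if i = o then (1 : Int) else if i = c then -1 else 0)) < 0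
      · simp [hneg, List.any_cons]
      · simp [hneg, List.any_cons]

-- ===== VERDICT (by name: the statement is the Claim_ definition above) =====
theorem bracket_penalty_spec : Claim_equal_bracket_penalty := by
  intro nt o c p _
  unfold Spec_bracket_penalty bracket_penalty bracket_penalty_alt
  by_cases h : o = -1 ∨ c = -1
  · simp [h]
  · simp only [h, if_false]
    simpa using pvLoopA_eq_scan o c p nt 0 0
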